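-- pv_equiv track=rewrite | github.com/CZhaoYoung/LCode | Twitter OA/Weird_Faculty.py | Weird_Faculty
-- ===== SOURCE A (Python) =====
-- def Weird_Faculty(v):
--     n = len(v)
--     # Convert all the zeros to -1 as
--     # the zero gives us the negative score of -1
--     for i in range(n):
--         if not v[i]:
--             v[i] = -1
--
--     # Find the total sum
--
--     totalSum = sum(v)
--     currSum = 0
--
--     # Find the point where current sum is
--     # greater than the total sum
--
--     for i in range(n):
--         if currSum > totalSum:
--             return i
--         currSum += v[i]
--         totalSum -= v[i]
--     return n
-- ===== SOURCE B (Python) =====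
-- def Weird_Faculty(v):
--     # same in-place conversion of falsy entries as A (caller-visible mutation preserved)
--     for i in range(len(v)):
--         if not v[i]:
--             v[i] = -1
--     # brute force: test each split point directly by summing both slices
--     for i in range(len(v)):
--         if sum(v[:i]) > sum(v[i:]):
--             return i
--     return len(v)
-- ===== Notes on version B (the rewrite author's own statement) =====
-- stated objective: simpler
-- what changed: Replaced A's fused scan maintaining a running currSum and a decremented totalSum by a brute-force split-point test that, for each index, directly sums the left and right slices and compares them.
import Mathlib
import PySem

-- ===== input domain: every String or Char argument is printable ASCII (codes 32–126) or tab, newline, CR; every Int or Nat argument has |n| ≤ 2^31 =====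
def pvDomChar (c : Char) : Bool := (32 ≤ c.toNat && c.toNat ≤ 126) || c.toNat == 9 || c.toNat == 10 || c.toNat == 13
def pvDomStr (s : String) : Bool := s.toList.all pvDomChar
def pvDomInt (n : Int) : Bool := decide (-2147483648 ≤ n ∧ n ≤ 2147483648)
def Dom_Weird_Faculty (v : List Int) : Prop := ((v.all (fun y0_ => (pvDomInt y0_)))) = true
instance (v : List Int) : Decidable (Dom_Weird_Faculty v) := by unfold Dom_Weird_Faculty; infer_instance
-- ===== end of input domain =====

-- B replaces A's fused running-sum scan by a brute-force split-point test that re-sums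
-- both slices at each index (simpler decomposition, not faster). A mutates v in place;
-- the equivalence proved here is about the return value only.
-- ===== PORT A =====
def pvConvA : List Int → List Int
  | [] => []
  | x :: xs => (if x = 0 then -1 else x) :: pvConvA xs

def pvLoopA : List Int → Int → Int → Int → Int
  | [], i, _, _ => i
  | x :: rest, i, currSum, totalSum =>
      if currSum > totalSum then i
      else pvLoopA rest (i + 1) (currSum + x) (totalSum - x)

def Weird_Faculty (v : List Int) : Int :=
  let w := pvConvA v
  pvLoopA w 0 0 w.sum

-- ===== PORT B =====
def pvConvB : List Int → List Int
  | [] => []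
  | x :: xs => (if x = 0 then -1 else x) :: pvConvB xs

-- for i in range(len(w)): if sum(w[:i]) > sum(w[i:]): return i; return len(w)
def pvSearchB (w : List Int) (i : Nat) : Int :=
  if i < w.length then
    if (w.take i).sum > (w.drop i).sum then (i : Int)
    else pvSearchB w (i + 1)
  else (w.length : Int)
termination_by w.length - i

def Weird_Faculty_alt (v : List Int) : Int :=
  let w := pvConvB v
  pvSearchB w 0

-- ===== PRECONDITION & SPEC =====
def Spec_Weird_Faculty (v : List Int) (out : Int) : Prop := out = Weird_Faculty_alt v
instance (v : List Int) (out : Int) : Decidable (Spec_Weird_Faculty v out) := by unfold Spec_Weird_Faculty; infer_instance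

-- ===== CLAIM (what is proved, stated in full; the proofs are below) =====
def Claim_equal_Weird_Faculty : Prop := ∀ (v : List Int), Dom_Weird_Faculty v → Spec_Weird_Faculty v (Weird_Faculty v)

-- ===== LEMMAS AND PROOFS =====
theorem pvConv_eq (xs : List Int) : pvConvA xs = pvConvB xs := by
  induction xs with
  | nil => rfl
  | cons x xs ih => simp [pvConvA, pvConvB, ih]

theorem pvLoop_eq (w : List Int) : ∀ (i : Nat), i ≤ w.length →
    pvLoopA (w.drop i) (i : Int) (w.take i).sum (w.drop i).sum = pvSearchB w i := by
  intro i
  induction h : w.length - i generalizing i with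
  | zero =>
      intro hle
      have : i = w.length := by omega
      subst this
      simp [pvLoopA, pvSearchB]
  | succ k ih =>
      intro hle
      have hi : i < w.length := by omega
      obtain ⟨x, hx⟩ : ∃ x, w[i]? = some x := ⟨w[i], List.getElem?_eq_getElem hi⟩
      have hdrop : w.drop i = x :: w.drop (i + 1) := by
        rw [List.drop_eq_getElem_cons hi]
        simp_all
      have htake : (w.take (i + 1)).sum = (w.take i).sum + x := by
        rw [List.take_add_one]
        simp [hx]
      have hdrops : (w.drop i).sum = (w.drop (i + 1)).sum + x := by
        rw [hdrop]; simp [List.sum_cons]; ring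
      have key : pvLoopA (w.drop i) (i : Int) (w.take i).sum (w.drop i).sum
          = if (w.take i).sum > (w.drop i).sum then (i : Int)
            else pvLoopA (w.drop (i + 1)) ((i : Int) + 1) ((w.take i).sum + x) ((w.drop i).sum - x) := by
        conv_lhs => rw [hdrop]
        simp only [pvLoopA]
        rw [← hdrop]
      rw [key, pvSearchB, if_pos hi]
      by_cases hc : (w.take i).sum > (w.drop i).sum
      · rw [if_pos hc, if_pos hc]
      · rw [if_neg hc, if_neg hc]
        have h2 : (w.drop i).sum - x = (w.drop (i + 1)).sum := by omega
        rw [h2]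
        have hih := ih (i + 1) (by omega) (by omega)
        rw [htake] at hih
        push_cast at hih
        exact hih

-- ===== VERDICT (by name: the statement is the Claim_ definition above) =====
theorem Weird_Faculty_spec : Claim_equal_Weird_Faculty := by
  intro v _
  unfold Spec_Weird_Faculty Weird_Faculty Weird_Faculty_alt
  rw [← pvConv_eq]
  have := pvLoop_eq (pvConvA v) 0 (by omega)
  simpa using this
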